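-- pv_equiv track=rewrite | github.com/tharunm490/Smart-Cooking-Assistant | backend/recipe_generator.py | _query_aliases
-- ===== SOURCE A (Python) =====
-- DISH_ALIAS_MAP: dict[str, list[str]] = {
--     "tomato bath": ["tomato bath", "tomato rice"],
--     "tomato rice": ["tomato rice", "tomato bath"],
--     "spinach dosa": ["spinach dosa", "palak dosa"],
--     "sambar": ["sambar"],
--     "carrot halwa": ["carrot halwa", "gajar halwa"],
--     "halwa": ["halwa"],
--     "dosa": ["dosa"],
--     "rice": ["rice", "pulao", "bath"],
-- }
--
-- def _query_aliases(query: str) -> list[str]: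
--     if not query:
--         return []
--
--     aliases = {query}
--     for canonical, variants in DISH_ALIAS_MAP.items():
--         all_terms = {canonical, *variants}
--         if query in all_terms:
--             aliases.update(all_terms)
--     return [alias for alias in aliases if alias.strip()]
-- ===== SOURCE B (Python) =====
-- DISH_ALIAS_MAP: dict[str, list[str]] = {
--     "tomato bath": ["tomato bath", "tomato rice"],
--     "tomato rice": ["tomato rice", "tomato bath"],
--     "spinach dosa": ["spinach dosa", "palak dosa"],
--     "sambar": ["sambar"],
--     "carrot halwa": ["carrot halwa", "gajar halwa"],
--     "halwa": ["halwa"],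
--     "dosa": ["dosa"],
--     "rice": ["rice", "pulao", "bath"],
-- }
--
-- # Inverted index built once at module load: term -> union of all_terms of every entry containing it.
-- INDEX: dict[str, set[str]] = {}
-- for _canonical, _variants in DISH_ALIAS_MAP.items():
--     _ts = {_canonical, *_variants}
--     for _t in _ts:
--         INDEX.setdefault(_t, set()).update(_ts)
--
-- def _query_aliases(query: str) -> list[str]:
--     if not query:
--         return []
--     aliases = {query} | INDEX.get(query, set())
--     return [alias for alias in aliases if alias.strip()]
-- ===== Notes on version B (the rewrite author's own statement) =====
-- stated objective: idiomatic
-- what changed: Replaces the per-call scan over all DISH_ALIAS_MAP entries with an inverted index built once at module load, so each call is a single dict lookup unioned with {query}.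
import Mathlib
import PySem

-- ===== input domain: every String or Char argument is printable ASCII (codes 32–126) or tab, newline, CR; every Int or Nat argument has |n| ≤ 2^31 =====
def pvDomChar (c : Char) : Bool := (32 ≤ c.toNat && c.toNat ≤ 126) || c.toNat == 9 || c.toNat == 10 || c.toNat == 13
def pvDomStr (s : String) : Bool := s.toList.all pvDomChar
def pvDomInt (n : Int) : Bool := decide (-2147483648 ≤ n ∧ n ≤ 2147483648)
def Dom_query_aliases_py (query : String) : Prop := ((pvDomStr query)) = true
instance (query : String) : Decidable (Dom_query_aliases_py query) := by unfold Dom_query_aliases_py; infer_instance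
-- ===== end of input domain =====

-- B replaces A's scan over DISH_ALIAS_MAP with a one-time inverted index and a single lookup (idiomatic/alternative; return value only).

-- ===== PORT A =====
def DISH_ALIAS_MAP : List (String × List String) := [
  ("tomato bath", ["tomato bath", "tomato rice"]),
  ("tomato rice", ["tomato rice", "tomato bath"]),
  ("spinach dosa", ["spinach dosa", "palak dosa"]),
  ("sambar", ["sambar"]),
  ("carrot halwa", ["carrot halwa", "gajar halwa"]),
  ("halwa", ["halwa"]),
  ("dosa", ["dosa"]),
  ("rice", ["rice", "pulao", "bath"])]

def query_aliases_py (query : String) : List String :=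
  if query = "" then []
  else
    let aliases : PySem.Set String :=
      DISH_ALIAS_MAP.foldl (fun al kv =>
        let all_terms : PySem.Set String := PySem.Set.ofList (kv.1 :: kv.2)
        if query ∈ all_terms then PySem.Set.update al all_terms else al)
        (PySem.Set.ofList [query])
    aliases.filter (fun a => PySem.Str.strip a != "")

-- ===== PORT B =====
-- INDEX built once: each term maps to the union of all_terms of every entry containing it.
def INDEX : PySem.Dict String (PySem.Set String) :=
  DISH_ALIAS_MAP.foldl (fun d kv =>
    let ts : PySem.Set String := PySem.Set.ofList (kv.1 :: kv.2)
    ts.foldl (fun d t => d.insert t (PySem.Set.update (d.getD t PySem.Set.empty) ts)) d)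
    PySem.Dict.empty

def query_aliases_py_alt (query : String) : List String :=
  if query = "" then []
  else
    let aliases : PySem.Set String :=
      PySem.Set.union (PySem.Set.ofList [query]) (INDEX.getD query PySem.Set.empty)
    aliases.filter (fun a => PySem.Str.strip a != "")

-- ===== PRECONDITION & SPEC =====
def Spec_query_aliases_py (query : String) (out : List String) : Prop := out = query_aliases_py_alt query
instance (query : String) (out : List String) : Decidable (Spec_query_aliases_py query out) := by unfold Spec_query_aliases_py; infer_instance

-- ===== CLAIM (what is proved, stated in full; the proofs are below) =====
def Claim_equal_query_aliases_py : Prop := ∀ (query : String), Dom_query_aliases_py query → Spec_query_aliases_py query (query_aliases_py query)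

-- ===== LEMMAS AND PROOFS =====

-- INDEX evaluated once to its literal association list (proved by the kernel; reused below).
theorem INDEX_eq : INDEX = PySem.Dict.mk [("tomato bath", ["tomato bath", "tomato rice"]), ("tomato rice", ["tomato bath", "tomato rice"]), ("spinach dosa", ["spinach dosa", "palak dosa"]), ("palak dosa", ["spinach dosa", "palak dosa"]), ("sambar", ["sambar"]), ("carrot halwa", ["carrot halwa", "gajar halwa"]), ("gajar halwa", ["carrot halwa", "gajar halwa"]), ("halwa", ["halwa"]), ("dosa", ["dosa"]), ("rice", ["rice", "pulao", "bath"]), ("pulao", ["rice", "pulao", "bath"]), ("bath", ["rice", "pulao", "bath"])] := rfl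

-- A's scan adds nothing when the query is in none of the entries' term sets.
theorem miss_fold (q : String) (l : List (String × List String)) (s : PySem.Set String)
    (h : ∀ kv ∈ l, q ∉ PySem.Set.ofList (kv.1 :: kv.2)) :
    l.foldl (fun al kv =>
      let all_terms : PySem.Set String := PySem.Set.ofList (kv.1 :: kv.2)
      if q ∈ all_terms then PySem.Set.update al all_terms else al) s = s := by
  induction l generalizing s with
  | nil => rfl
  | cons kv tl ih =>
      simp only [List.foldl]
      rw [if_neg (h kv (List.mem_cons_self ..))]
      exact ih s (fun x hx => h x (List.mem_cons_of_mem _ hx))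

-- A = B on every input: the query is empty, one of the finitely many indexed terms, or misses both the map scan and the index.
theorem qa_main : ∀ (query : String), query_aliases_py query = query_aliases_py_alt query := by
  intro query
  by_cases hq : query = ""
  · subst hq; rfl
  by_cases hT : query ∈ ["tomato bath", "tomato rice", "spinach dosa", "palak dosa", "sambar", "carrot halwa", "gajar halwa", "halwa", "dosa", "rice", "pulao", "bath"]
  · simp only [List.mem_cons, List.not_mem_nil, or_false] at hT
    rcases hT with rfl|rfl|rfl|rfl|rfl|rfl|rfl|rfl|rfl|rfl|rfl|rfl <;>
      simp only [query_aliases_py_alt, INDEX_eq] <;> rfl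
  · simp only [List.mem_cons, List.not_mem_nil, or_false, not_or] at hT
    obtain ⟨h1,h2,h3,h4,h5,h6,h7,h8,h9,h10,h11,h12⟩ := hT
    have hmem : ∀ kv ∈ DISH_ALIAS_MAP, query ∉ PySem.Set.ofList (kv.1 :: kv.2) := by
      intro kv hkv
      simp only [DISH_ALIAS_MAP, List.mem_cons, List.not_mem_nil, or_false] at hkv
      rcases hkv with rfl|rfl|rfl|rfl|rfl|rfl|rfl|rfl <;>
        simp only [PySem.Set.mem_ofList, List.mem_cons, List.not_mem_nil,
          h1,h2,h3,h4,h5,h6,h7,h8,h9,h10,h11,h12, or_self, not_false_eq_true]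
    have hget : (PySem.Dict.mk [("tomato bath", ["tomato bath", "tomato rice"]), ("tomato rice", ["tomato bath", "tomato rice"]), ("spinach dosa", ["spinach dosa", "palak dosa"]), ("palak dosa", ["spinach dosa", "palak dosa"]), ("sambar", ["sambar"]), ("carrot halwa", ["carrot halwa", "gajar halwa"]), ("gajar halwa", ["carrot halwa", "gajar halwa"]), ("halwa", ["halwa"]), ("dosa", ["dosa"]), ("rice", ["rice", "pulao", "bath"]), ("pulao", ["rice", "pulao", "bath"]), ("bath", ["rice", "pulao", "bath"])]).get? query = none := by
      simp only [PySem.Dict.get?_mk_cons, beq_iff_eq,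
        Ne.symm h1, Ne.symm h2, Ne.symm h3, Ne.symm h4, Ne.symm h5, Ne.symm h6,
        Ne.symm h7, Ne.symm h8, Ne.symm h9, Ne.symm h10, Ne.symm h11, Ne.symm h12,
        if_false,
        show (PySem.Dict.mk ([] : List (String × PySem.Set String))).get? query = none from rfl]
    rw [query_aliases_py, query_aliases_py_alt, if_neg hq, if_neg hq, INDEX_eq]
    dsimp only
    rw [miss_fold query DISH_ALIAS_MAP _ hmem, PySem.Dict.getD, hget]
    rfl

-- ===== VERDICT (by name: the statement is the Claim_ definition above) =====
theorem query_aliases_py_spec : Claim_equal_query_aliases_py := by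
  intro query _
  unfold Spec_query_aliases_py
  exact qa_main query
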